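-- pv_equiv track=rewrite | github.com/tombursey-oss/collatz-automaton-lean | determinism_check.py | find_min_modulus
-- ===== SOURCE A (Python) =====
-- def nu2(m):
--     """2-adic valuation: highest power of 2 dividing m"""
--     if m == 0:
--         return 0
--     count = 0
--     while m % 2 == 0:
--         count += 1
--         m //= 2
--     return count
--
-- def oddBlock(n):
--     """Collatz oddBlock: (3n+1) / 2^{ν₂(3n+1)}"""
--     if n % 2 == 0:
--         return None  # Only defined for odd n
--     val = nu2(3 * n + 1)
--     return (3 * n + 1) // (2 ** val)
--
-- def find_representatives(residue, branch, num_representatives=20):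
--     """
--     Find representatives of the equivalence class S(residue, branch).
--
--     S(r,b) = {n : n % 64 = r and (n // 64) % 2 = b}
--     These are: n = 64(2k + b) + r = 128k + (64b + r)
--     """
--     start = 64 * (2 * 0 + branch) + residue  # First element
--     representatives = [start + 128 * i for i in range(num_representatives)]
--     return representatives
--
-- def get_arithmetic_signature(n):
--     """For an odd n, get (r-value, destination residue, destination branch)"""
--     if n % 2 == 0:
--         return None
--
--     r = nu2(3 * n + 1)
--     dst = oddBlock(n)
--     dst_residue = dst % 64
--     dst_branch = (dst // 64) % 2
--
--     return (r, dst_residue, dst_branch)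
--
-- def find_min_modulus(residue, branch, max_modulus=2**20):
--     """
--     Find minimum modulus M such that all representatives with same n % M
--     have the same arithmetic signature.
--
--     Returns: (is_deterministic, min_modulus)
--     where is_deterministic = True if M <= 64, False if M > 64
--     """
--     representatives = find_representatives(residue, branch, num_representatives=30)
--
--     # Get signatures for all representatives
--     signatures_by_residue = {}
--     for n in representatives:
--         sig = get_arithmetic_signature(n)
--         n_mod_64 = n % 64
--         if n_mod_64 not in signatures_by_residue:
--             signatures_by_residue[n_mod_64] = []
--         signatures_by_residue[n_mod_64].append(sig)
--
--     # Check if mod 64 is deterministic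
--     is_consistent_mod64 = all(len(sigs) == 0 or len(set(sigs)) == 1
--                                for sigs in signatures_by_residue.values())
--
--     if is_consistent_mod64:
--         return (True, 64)
--
--     # Try larger moduli
--     for exp in range(7, 21):  # 2^7 = 128 to 2^20 = 1048576
--         modulus = 2 ** exp
--         signatures_by_residue_mod = {}
--
--         for n in representatives:
--             sig = get_arithmetic_signature(n)
--             n_mod_m = n % modulus
--             if n_mod_m not in signatures_by_residue_mod:
--                 signatures_by_residue_mod[n_mod_m] = set()
--             signatures_by_residue_mod[n_mod_m].add(sig)
--
--         # Check if this modulus is deterministic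
--         is_consistent = all(len(sigs) == 1 for sigs in signatures_by_residue_mod.values())
--
--         if is_consistent:
--             return (False, modulus)
--
--     # If even 2^20 doesn't work, mark as problematic
--     return (False, 2**20 + 1)
-- ===== SOURCE B (Python) =====
-- def _signature(n):
--     """Arithmetic signature of n: None if n even, else (nu2(3n+1), dst%64, (dst//64)%2)."""
--     if n % 2 == 0:
--         return None
--     m = 3 * n + 1
--     r = 0
--     while m % 2 == 0:
--         m //= 2
--         r += 1
--     return (r, m % 64, (m // 64) % 2)
--
-- def find_min_modulus(residue, branch, max_modulus=2**20):
--     base = 64 * branch + residue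
--     reps = [base + 128 * i for i in range(30)]
--     sigs = [_signature(n) for n in reps]
--     # All reps share n % 64, so mod-64 determinism = all signatures equal.
--     if all(s == sigs[0] for s in sigs):
--         return (True, 64)
--     for exp in range(7, 21):
--         modulus = 2 ** exp
--         if not any(reps[i] % modulus == reps[j] % modulus and sigs[i] != sigs[j]
--                    for i in range(30) for j in range(i + 1, 30)):
--             return (False, modulus)
--     return (False, 2**20 + 1)
-- ===== Notes on version B (the rewrite author's own statement) =====
-- stated objective: alternative
-- what changed: B computes the 30 representatives and their arithmetic signatures once with a single fused valuation loop (instead of recomputing nu2/oddBlock/signature per representative per modulus), decides the mod-64 case by checking all signatures equal, and replaces each modulus's dict-of-sets bucketing by a nested pairwise scan for a colliding pair with differing signatures.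
import Mathlib
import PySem

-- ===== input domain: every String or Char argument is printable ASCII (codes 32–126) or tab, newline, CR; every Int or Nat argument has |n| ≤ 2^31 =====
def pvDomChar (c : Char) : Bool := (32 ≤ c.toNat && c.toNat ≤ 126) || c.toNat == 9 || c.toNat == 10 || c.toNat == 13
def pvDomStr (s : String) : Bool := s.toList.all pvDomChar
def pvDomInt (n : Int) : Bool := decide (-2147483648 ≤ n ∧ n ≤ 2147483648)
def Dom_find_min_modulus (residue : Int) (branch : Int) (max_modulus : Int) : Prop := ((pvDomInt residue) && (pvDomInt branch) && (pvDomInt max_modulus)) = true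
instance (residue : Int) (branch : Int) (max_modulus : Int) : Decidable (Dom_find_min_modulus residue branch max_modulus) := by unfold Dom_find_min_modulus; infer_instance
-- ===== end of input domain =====

-- B computes the 30 signatures once with a single fused loop and replaces the
-- per-modulus dict-of-sets bucketing by a pairwise collision scan; same return
-- value everywhere (objective: alternative decomposition, constant-factor less
-- signature recomputation).

-- ===== PORT A =====
-- while m % 2 == 0: count += 1; m //= 2   (the `m = 0` guard only totalizes the
-- recursion; nu2 never calls it with m = 0 and the loop preserves m ≠ 0)
def nu2Loop (m : Int) (count : Int) : Int :=
  if _h0 : m = 0 then count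
  else if _h2 : PySem.Int.mod m 2 = 0 then nu2Loop (PySem.Int.floordiv m 2) (count + 1)
  else count
termination_by m.natAbs
decreasing_by
  have hd : (2:Int) ∣ m := (PySem.Int.mod_eq_zero_iff_dvd m 2).mp _h2
  obtain ⟨t, rfl⟩ := hd
  rw [PySem.Int.floordiv_eq_ediv_of_pos (by norm_num), Int.mul_ediv_cancel_left t (by norm_num)]
  omega

def nu2 (m : Int) : Int :=
  if m = 0 then 0 else nu2Loop m 0

-- Python computes 2 ** val with val = nu2 (3n+1) ≥ 0, so `.toNat` is exact here.
def oddBlock (n : Int) : Option Int :=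
  if PySem.Int.mod n 2 = 0 then none
  else some (PySem.Int.floordiv (3 * n + 1) ((2:Int) ^ (nu2 (3 * n + 1)).toNat))

def find_representatives (residue : Int) (branch : Int) (num_representatives : Int) : List Int :=
  let start := 64 * (2 * 0 + branch) + residue
  (PySem.List.pyRange 0 num_representatives 1).map (fun i => start + 128 * i)

-- `dst` is `oddBlock n`, an int whenever n is odd; the `none` branch of the match
-- is unreachable in that case (Python would crash on it, but never reaches it).
def get_arithmetic_signature (n : Int) : Option (Int × Int × Int) :=
  if PySem.Int.mod n 2 = 0 then none
  else
    let r := nu2 (3 * n + 1)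
    match oddBlock n with
    | none => none
    | some dst => some (r, PySem.Int.mod dst 64, PySem.Int.mod (PySem.Int.floordiv dst 64) 2)

-- `for exp in range(7, 21): …` with early return (exp ≥ 7, so `.toNat` in 2 ** exp is exact)
def fmmA_loop (representatives : List Int) : List Int → Bool × Int
  | [] => (false, 2 ^ 20 + 1)
  | exp :: rest =>
    let modulus : Int := (2:Int) ^ exp.toNat
    let d := representatives.foldl (fun d n =>
      let sig := get_arithmetic_signature n
      let nModM := PySem.Int.mod n modulus
      let d := if d.contains nModM then d else d.insert nModM PySem.Set.empty
      d.modify nModM PySem.Set.empty (fun s => PySem.Set.add s sig)) PySem.Dict.empty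
    let is_consistent := d.values.all (fun sigs => PySem.Set.len sigs == 1)
    if is_consistent then (false, modulus) else fmmA_loop representatives rest

def find_min_modulus (residue : Int) (branch : Int) (max_modulus : Int) : Bool × Int :=
  let representatives := find_representatives residue branch 30
  let d := representatives.foldl (fun d n =>
    let sig := get_arithmetic_signature n
    let nMod64 := PySem.Int.mod n 64
    let d := if d.contains nMod64 then d else d.insert nMod64 ([] : List (Option (Int × Int × Int)))
    d.modify nMod64 [] (fun sigs => sigs ++ [sig])) PySem.Dict.empty
  let is_consistent_mod64 := d.values.all (fun sigs =>
    sigs.length == 0 || PySem.Set.len (PySem.Set.ofList sigs) == 1)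
  if is_consistent_mod64 then (true, 64)
  else fmmA_loop representatives (PySem.List.pyRange 7 21 1)

-- ===== PORT B =====
-- fused loop: while m % 2 == 0: m //= 2; r += 1  (returns final (m, r); the
-- `m = 0` guard only totalizes the recursion — _signature never passes m = 0)
def sigLoopB (m : Int) (r : Int) : Int × Int :=
  if _h0 : m = 0 then (m, r)
  else if _h2 : PySem.Int.mod m 2 = 0 then sigLoopB (PySem.Int.floordiv m 2) (r + 1)
  else (m, r)
termination_by m.natAbs
decreasing_by
  have hd : (2:Int) ∣ m := (PySem.Int.mod_eq_zero_iff_dvd m 2).mp _h2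
  obtain ⟨t, rfl⟩ := hd
  rw [PySem.Int.floordiv_eq_ediv_of_pos (by norm_num), Int.mul_ediv_cancel_left t (by norm_num)]
  omega

def sigB (n : Int) : Option (Int × Int × Int) :=
  if PySem.Int.mod n 2 = 0 then none
  else
    let p := sigLoopB (3 * n + 1) 0
    some (p.2, PySem.Int.mod p.1 64, PySem.Int.mod (PySem.Int.floordiv p.1 64) 2)

-- not any(reps[i] % modulus == reps[j] % modulus and sigs[i] != sigs[j] …)
def fmmB_loop (reps : List Int) (sigs : List (Option (Int × Int × Int))) : List Int → Bool × Int
  | [] => (false, 2 ^ 20 + 1)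
  | exp :: rest =>
    let modulus : Int := (2:Int) ^ exp.toNat
    let bad := (PySem.List.pyRange 0 30 1).any (fun i =>
      (PySem.List.pyRange (i + 1) 30 1).any (fun j =>
        (PySem.Int.mod (PySem.List.pyGetD reps i 0) modulus
            == PySem.Int.mod (PySem.List.pyGetD reps j 0) modulus)
        && (PySem.List.pyGetD sigs i none != PySem.List.pyGetD sigs j none)))
    if bad then fmmB_loop reps sigs rest else (false, modulus)

def find_min_modulus_alt (residue : Int) (branch : Int) (max_modulus : Int) : Bool × Int :=
  let base := 64 * branch + residue
  let reps := (PySem.List.pyRange 0 30 1).map (fun i => base + 128 * i)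
  let sigs := reps.map sigB
  if sigs.all (fun s => s == PySem.List.pyGetD sigs 0 none) then (true, 64)
  else fmmB_loop reps sigs (PySem.List.pyRange 7 21 1)

-- ===== PRECONDITION & SPEC =====
def Spec_find_min_modulus (residue : Int) (branch : Int) (max_modulus : Int) (out : Bool × Int) : Prop := out = find_min_modulus_alt residue branch max_modulus
instance (residue : Int) (branch : Int) (max_modulus : Int) (out : Bool × Int) : Decidable (Spec_find_min_modulus residue branch max_modulus out) := by unfold Spec_find_min_modulus; infer_instance

-- ===== CLAIM (what is proved, stated in full; the proofs are below) =====
def Claim_equal_find_min_modulus : Prop := ∀ (residue : Int) (branch : Int) (max_modulus : Int), Dom_find_min_modulus residue branch max_modulus → Spec_find_min_modulus residue branch max_modulus (find_min_modulus residue branch max_modulus)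

-- ===== LEMMAS AND PROOFS =====

lemma floordiv_two_mul (t : Int) : PySem.Int.floordiv (2 * t) 2 = t := by
  rw [PySem.Int.floordiv_eq_ediv_of_pos (by norm_num), Int.mul_ediv_cancel_left t (by norm_num)]

lemma nu2Loop_zero (c : Int) : nu2Loop 0 c = c := by rw [nu2Loop]; simp

lemma nu2Loop_odd {m : Int} (h2 : PySem.Int.mod m 2 ≠ 0) (c : Int) : nu2Loop m c = c := by
  have h0 : m ≠ 0 := by rintro rfl; exact h2 (by rw [PySem.Int.mod_eq_zero_iff_dvd]; exact ⟨0, by ring⟩)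
  rw [nu2Loop, dif_neg h0, dif_neg h2]

lemma nu2Loop_even {t : Int} (h0 : 2 * t ≠ 0) (c : Int) :
    nu2Loop (2 * t) c = nu2Loop t (c + 1) := by
  have h2 : PySem.Int.mod (2 * t) 2 = 0 := by rw [PySem.Int.mod_eq_zero_iff_dvd]; exact ⟨t, rfl⟩
  rw [nu2Loop, dif_neg h0, dif_pos h2, floordiv_two_mul]

lemma nu2Loop_shift (m : Int) (c : Int) : nu2Loop m c = nu2Loop m 0 + c := by
  by_cases h0 : m = 0
  · subst h0; rw [nu2Loop_zero, nu2Loop_zero]; ring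
  by_cases h2 : PySem.Int.mod m 2 = 0
  · obtain ⟨t, rfl⟩ := (PySem.Int.mod_eq_zero_iff_dvd _ 2).mp h2
    rw [nu2Loop_even h0, nu2Loop_even h0, nu2Loop_shift t (c + 1), nu2Loop_shift t (0 + 1)]
    ring
  · rw [nu2Loop_odd h2, nu2Loop_odd h2]; ring
termination_by m.natAbs
decreasing_by all_goals omega

lemma nu2Loop_nonneg (m : Int) : 0 ≤ nu2Loop m 0 := by
  by_cases h0 : m = 0
  · subst h0; rw [nu2Loop_zero]
  by_cases h2 : PySem.Int.mod m 2 = 0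
  · obtain ⟨t, rfl⟩ := (PySem.Int.mod_eq_zero_iff_dvd _ 2).mp h2
    rw [nu2Loop_even h0, nu2Loop_shift t (0 + 1)]
    have := nu2Loop_nonneg t
    omega
  · rw [nu2Loop_odd h2]
termination_by m.natAbs
decreasing_by all_goals omega

lemma sigLoopB_odd {m : Int} (h2 : PySem.Int.mod m 2 ≠ 0) (r : Int) : sigLoopB m r = (m, r) := by
  have h0 : m ≠ 0 := by rintro rfl; exact h2 (by rw [PySem.Int.mod_eq_zero_iff_dvd]; exact ⟨0, by ring⟩)
  rw [sigLoopB, dif_neg h0, dif_neg h2]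

lemma sigLoopB_even {t : Int} (h0 : 2 * t ≠ 0) (r : Int) :
    sigLoopB (2 * t) r = sigLoopB t (r + 1) := by
  have h2 : PySem.Int.mod (2 * t) 2 = 0 := by rw [PySem.Int.mod_eq_zero_iff_dvd]; exact ⟨t, rfl⟩
  rw [sigLoopB, dif_neg h0, dif_pos h2, floordiv_two_mul]

lemma sigLoopB_eq (m : Int) (hm : m ≠ 0) (r : Int) :
    sigLoopB m r = (PySem.Int.floordiv m ((2:Int) ^ (nu2Loop m 0).toNat), r + nu2Loop m 0) := by
  by_cases h2 : PySem.Int.mod m 2 = 0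
  · obtain ⟨t, rfl⟩ := (PySem.Int.mod_eq_zero_iff_dvd _ 2).mp h2
    have ht : t ≠ 0 := by intro h; exact hm (by rw [h]; ring)
    have hnn := nu2Loop_nonneg t
    rw [sigLoopB_even hm, sigLoopB_eq t ht (r + 1), nu2Loop_even hm, nu2Loop_shift t (0 + 1)]
    have htn : (nu2Loop t 0 + (0 + 1)).toNat = (nu2Loop t 0).toNat + 1 := by omega
    rw [htn, Prod.mk.injEq]
    refine ⟨?_, by ring⟩
    · rw [pow_succ, PySem.Int.floordiv_eq_ediv_of_pos (by positivity),
          PySem.Int.floordiv_eq_ediv_of_pos (by positivity)]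
      rw [show (2:Int) ^ (nu2Loop t 0).toNat * 2 = 2 * 2 ^ (nu2Loop t 0).toNat by ring]
      rw [Int.mul_ediv_mul_of_pos _ _ (by norm_num)]
  · rw [sigLoopB_odd h2, nu2Loop_odd h2]
    rw [show Int.toNat 0 = 0 from rfl, pow_zero]
    rw [PySem.Int.floordiv_eq_ediv_of_pos (by norm_num), Int.ediv_one]
    simp
termination_by m.natAbs
decreasing_by all_goals omega

lemma sig_eq (n : Int) : get_arithmetic_signature n = sigB n := by
  by_cases he : PySem.Int.mod n 2 = 0
  · have hd : (2:Int) ∣ n := (PySem.Int.mod_eq_zero_iff_dvd n 2).mp he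
    simp [get_arithmetic_signature, sigB, hd]
  · have hM0 : 3 * n + 1 ≠ 0 := by omega
    simp only [get_arithmetic_signature, sigB, if_neg he, oddBlock, nu2, if_neg hM0,
      sigLoopB_eq (3 * n + 1) hM0 0, zero_add]

lemma insert_insert_self {σ : Type} (d : PySem.Dict Int σ) (k : Int) (v w : σ) :
    (d.insert k v).insert k w = d.insert k w := by
  apply PySem.Dict.ext
  have h2 : (d.insert k v).contains k = true := PySem.Dict.contains_insert_self d k v
  by_cases hc : d.contains k = true
  · simp only [PySem.Dict.insert, hc, if_true] at h2 ⊢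
    simp only [h2, if_true]
    rw [List.map_map]
    apply List.map_congr_left
    intro p _
    by_cases hp : p.1 = k
    · simp [hp]
    · simp [hp]
  · rw [Bool.not_eq_true] at hc
    have hall : ∀ p ∈ d.items, ¬(p.1 == k) = true := by
      intro p hp hpk
      have : d.contains k = true := by
        simp only [PySem.Dict.contains, List.any_eq_true]
        exact ⟨p, hp, hpk⟩
      rw [hc] at this; exact Bool.false_ne_true this
    simp only [PySem.Dict.insert, hc, Bool.false_eq_true, if_false] at h2 ⊢
    simp only [h2, if_true]
    rw [List.map_append]
    have hid : d.items.map (fun p => if p.1 = k then (k, w) else p) = d.items := by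
      conv_rhs => rw [← List.map_id d.items]
      apply List.map_congr_left
      intro p hp
      have := hall p hp
      simp only [beq_iff_eq] at this
      simp [this]
    simp [hid]

lemma step_modify {σ : Type} (d : PySem.Dict Int σ) (k : Int) (dflt : σ) (g : σ → σ) :
    PySem.Dict.modify (if d.contains k then d else d.insert k dflt) k dflt g
      = PySem.Dict.modify d k dflt g := by
  by_cases hc : d.contains k = true
  · rw [if_pos hc]
  · rw [Bool.not_eq_true] at hc
    rw [if_neg (by simp [hc])]
    show (d.insert k dflt).insert k (g ((d.insert k dflt).getD k dflt)) = d.insert k (g (d.getD k dflt))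
    rw [PySem.Dict.getD_insert_self, PySem.Dict.getD_of_not_contains d dflt hc,
        insert_insert_self]

lemma getD_group {α σ : Type} (key : α → Int) (upd : σ → α → σ) (dflt : σ) :
    ∀ (l : List α) (d : PySem.Dict Int σ) (k : Int),
      (l.foldl (fun d n => PySem.Dict.modify d (key n) dflt (fun s => upd s n)) d).getD k dflt
        = (l.filter (fun n => key n == k)).foldl upd (d.getD k dflt)
  | [], d, k => rfl
  | n :: l, d, k => by
    simp only [List.foldl_cons, List.filter_cons]
    rw [getD_group key upd dflt l _ k]
    by_cases hk : key n = k
    · rw [if_pos (by simp [hk]), List.foldl_cons]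
      congr 1
      rw [PySem.Dict.getD_modify, if_pos hk.symm, hk]
    · rw [if_neg (by simp [hk])]
      congr 1
      rw [PySem.Dict.getD_modify, if_neg (fun h => hk h.symm)]

lemma values_all_iff {κ ν : Type} [BEq κ] [LawfulBEq κ] (d : PySem.Dict κ ν) (p : ν → Bool)
    (dflt : ν) (hnd : d.keys.Nodup) :
    (d.values.all p = true) ↔ ∀ k ∈ d.keys, p (d.getD k dflt) = true := by
  simp only [PySem.Dict.values, PySem.Dict.keys, List.all_eq_true, List.mem_map]
  constructor
  · rintro h k ⟨pr, hpr, rfl⟩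
    rw [PySem.Dict.getD_of_mem_items d (by exact hpr) hnd dflt]
    exact h _ ⟨pr, hpr, rfl⟩
  · rintro h v ⟨pr, hpr, rfl⟩
    have := h pr.1 ⟨pr, hpr, rfl⟩
    rwa [PySem.Dict.getD_of_mem_items d (by exact hpr) hnd dflt] at this

lemma dictAll_iff {σ : Type} (key : Int → Int) (upd : σ → Int → σ) (dflt : σ) (p : σ → Bool)
    (reps : List Int) :
    ((reps.foldl (fun d n => PySem.Dict.modify d (key n) dflt (fun s => upd s n))
        PySem.Dict.empty).values.all p = true)
      ↔ ∀ n ∈ reps, p ((reps.filter (fun x => key x == key n)).foldl upd dflt) = true := by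
  have hnd : (reps.foldl (fun d n => PySem.Dict.modify d (key n) dflt (fun s => upd s n))
      PySem.Dict.empty).keys.Nodup :=
    PySem.Dict.nodup_keys_foldl_modify_key reps key dflt (fun _ x => fun s => upd s x)
      PySem.Dict.empty PySem.Dict.nodup_keys_empty
  rw [values_all_iff _ p dflt hnd]
  have hkeys : (reps.foldl (fun d n => PySem.Dict.modify d (key n) dflt (fun s => upd s n))
      PySem.Dict.empty).keys = PySem.Set.ofList (reps.map key) := by
    rw [PySem.Dict.keys_foldl_modify_key reps key dflt (fun _ x => fun s => upd s x)]
    rfl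
  constructor
  · intro h n hn
    have := h (key n) (by
      rw [hkeys, PySem.Set.mem_ofList]
      exact List.mem_map.mpr ⟨n, hn, rfl⟩)
    rwa [getD_group key upd dflt reps PySem.Dict.empty (key n)] at this
  · intro h k hk
    rw [hkeys, PySem.Set.mem_ofList] at hk
    obtain ⟨n, hn, rfl⟩ := List.mem_map.mp hk
    rw [getD_group key upd dflt reps PySem.Dict.empty (key n)]
    exact h n hn

lemma setLen1 {S : Type} [BEq S] [LawfulBEq S] (l : List S) :
    ((PySem.Set.len (PySem.Set.ofList l) == 1) = true) ↔ (l ≠ [] ∧ ∀ x ∈ l, ∀ y ∈ l, x = y) := by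
  have hlen : ((PySem.Set.len (PySem.Set.ofList l) == 1) = true) ↔ (PySem.Set.ofList l).length = 1 := by
    simp [PySem.Set.len]
  rw [hlen]
  constructor
  · intro h
    obtain ⟨a, ha⟩ := List.length_eq_one_iff.mp h
    constructor
    · rintro rfl; simp [PySem.Set.ofList, PySem.Set.empty] at ha
    · intro x hx y hy
      have hx' : x ∈ PySem.Set.ofList l := (PySem.Set.mem_ofList l x).mpr hx
      have hy' : y ∈ PySem.Set.ofList l := (PySem.Set.mem_ofList l y).mpr hy
      rw [ha] at hx' hy'
      simp at hx' hy'; rw [hx', hy']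
  · rintro ⟨hne, hall⟩
    obtain ⟨a, t, rfl⟩ := List.exists_cons_of_ne_nil hne
    have hmem : a ∈ PySem.Set.ofList (a :: t) := (PySem.Set.mem_ofList _ a).mpr (by simp)
    have hsub : ∀ x ∈ PySem.Set.ofList (a :: t), x = a := by
      intro x hx
      exact hall x ((PySem.Set.mem_ofList _ x).mp hx) a (by simp)
    have hnd := PySem.Set.nodup_ofList (a :: t)
    rcases hs : PySem.Set.ofList (a :: t) with _ | ⟨b, _ | ⟨c, t'⟩⟩
    · rw [hs] at hmem; simp at hmem
    · rfl
    · rw [hs] at hsub hnd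
      have hb := hsub b (by simp)
      have hc := hsub c (by simp)
      rw [List.nodup_cons] at hnd
      exact absurd (show b ∈ c :: t' by simp [hb, hc]) hnd.1

lemma key64_const (base i : Int) :
    PySem.Int.mod (base + 128 * i) 64 = PySem.Int.mod base 64 := by
  rw [PySem.Int.mod_eq_emod_of_pos (by norm_num), PySem.Int.mod_eq_emod_of_pos (by norm_num),
      show (128 : Int) * i = 64 * (2 * i) by ring, Int.add_mul_emod_self_left]

lemma bucket_pair_iff {S : Type} [BEq S] [LawfulBEq S] (key : Int → Int) (f : Int → S) (reps : List Int) :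
    (∀ n ∈ reps, ((PySem.Set.len (PySem.Set.ofList ((reps.filter (fun x => key x == key n)).map f)) == 1) = true))
      ↔ ∀ x ∈ reps, ∀ y ∈ reps, key x = key y → f x = f y := by
  constructor
  · intro h x hx y hy hk
    have := (setLen1 _).mp (h y hy)
    refine this.2 (f x) ?_ (f y) ?_
    · exact List.mem_map.mpr ⟨x, List.mem_filter.mpr ⟨hx, by simp [hk]⟩, rfl⟩
    · exact List.mem_map.mpr ⟨y, List.mem_filter.mpr ⟨hy, by simp⟩, rfl⟩
  · intro h n hn
    refine (setLen1 _).mpr ⟨?_, ?_⟩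
    · intro hemp
      have : n ∈ reps.filter (fun x => key x == key n) := List.mem_filter.mpr ⟨hn, by simp⟩
      rw [List.map_eq_nil_iff.mp hemp] at this
      simp at this
    · rintro a ha b hb
      obtain ⟨x, hx, rfl⟩ := List.mem_map.mp ha
      obtain ⟨y, hy, rfl⟩ := List.mem_map.mp hb
      rw [List.mem_filter] at hx hy
      have hkx : key x = key n := by simpa using hx.2
      have hky : key y = key n := by simpa using hy.2
      exact h x hx.1 y hy.1 (hkx.trans hky.symm)

lemma foldl_add_ofList {S : Type} [BEq S] [LawfulBEq S] (f : Int → S) (l : List Int) :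
    l.foldl (fun s x => PySem.Set.add s (f x)) PySem.Set.empty = PySem.Set.ofList (l.map f) := by
  rw [PySem.Set.ofList, List.foldl_map]

lemma consA_set_iff' {S : Type} [BEq S] [LawfulBEq S] (key : Int → Int) (f : Int → S) (reps : List Int) :
    ((reps.foldl (fun d n => PySem.Dict.modify d (key n) PySem.Set.empty
          (fun s => PySem.Set.add s (f n))) PySem.Dict.empty).values.all
        (fun sigs => PySem.Set.len sigs == 1) = true)
      ↔ ∀ x ∈ reps, ∀ y ∈ reps, key x = key y → f x = f y := by
  rw [dictAll_iff key (fun s x => PySem.Set.add s (f x)) PySem.Set.empty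
      (fun sigs => PySem.Set.len sigs == 1) reps]
  simp only [foldl_add_ofList]
  exact bucket_pair_iff key f reps

lemma consA_list_iff' {S : Type} [BEq S] [LawfulBEq S] (key : Int → Int) (f : Int → S) (reps : List Int) :
    ((reps.foldl (fun d n => PySem.Dict.modify d (key n) ([] : List S)
          (fun s => s ++ [f n])) PySem.Dict.empty).values.all
        (fun sigs => sigs.length == 0 || PySem.Set.len (PySem.Set.ofList sigs) == 1) = true)
      ↔ ∀ x ∈ reps, ∀ y ∈ reps, key x = key y → f x = f y := by
  rw [dictAll_iff key (fun s x => s ++ [f x]) ([] : List S)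
      (fun sigs => sigs.length == 0 || PySem.Set.len (PySem.Set.ofList sigs) == 1) reps]
  simp only [PySem.List.foldl_append_singleton_eq_map, List.nil_append]
  rw [← bucket_pair_iff key f reps]
  apply forall₂_congr
  intro n hn
  have hne : (reps.filter (fun x => key x == key n)).map f ≠ [] := by
    intro hemp
    have : n ∈ reps.filter (fun x => key x == key n) := List.mem_filter.mpr ⟨hn, by simp⟩
    rw [List.map_eq_nil_iff.mp hemp] at this
    simp at this
  have hlen : (((reps.filter (fun x => key x == key n)).map f).length == 0) = false := by
    simpa using List.length_pos_of_ne_nil hne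
  rw [hlen, Bool.false_or]


-- ===== VERDICT (by name: the statement is the Claim_ definition above) =====
lemma hf_eq : get_arithmetic_signature = sigB := funext sig_eq

-- ¬bad over index pairs ⟺ the pairwise property over the representative list
lemma bad_iff (g : Int → Int) (M : Int) :
    (((PySem.List.pyRange 0 30 1).any (fun i =>
      (PySem.List.pyRange (i + 1) 30 1).any (fun j =>
        (PySem.Int.mod (PySem.List.pyGetD ((PySem.List.pyRange 0 30 1).map g) i 0) M
            == PySem.Int.mod (PySem.List.pyGetD ((PySem.List.pyRange 0 30 1).map g) j 0) M)
        && (PySem.List.pyGetD (((PySem.List.pyRange 0 30 1).map g).map sigB) i none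
            != PySem.List.pyGetD (((PySem.List.pyRange 0 30 1).map g).map sigB) j none)))) = false)
      ↔ ∀ x ∈ (PySem.List.pyRange 0 30 1).map g, ∀ y ∈ (PySem.List.pyRange 0 30 1).map g,
          PySem.Int.mod x M = PySem.Int.mod y M → sigB x = sigB y := by
  rw [List.map_map]
  simp only [List.any_eq_false]
  constructor
  · intro h x hx y hy hm
    obtain ⟨i, hi, rfl⟩ := List.mem_map.mp hx
    obtain ⟨j, hj, rfl⟩ := List.mem_map.mp hy
    rw [PySem.List.mem_pyRange_one] at hi hj
    have key : ∀ a b : Int, 0 ≤ a → a < 30 → a < b → b < 30 →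
        PySem.Int.mod (g a) M = PySem.Int.mod (g b) M → sigB (g a) = sigB (g b) := by
      intro a b ha0 ha hab hb hmod
      have := h a (PySem.List.mem_pyRange_one.mpr ⟨ha0, ha⟩)
      simp only [List.any_eq_true, not_exists, not_and] at this
      have := this b (PySem.List.mem_pyRange_one.mpr ⟨by omega, hb⟩)
      rw [PySem.List.pyGetD_map_pyRange_of_nonneg g 30 a 0 ha0 ha,
          PySem.List.pyGetD_map_pyRange_of_nonneg g 30 b 0 (by omega) hb,
          PySem.List.pyGetD_map_pyRange_of_nonneg (sigB ∘ g) 30 a none ha0 ha,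
          PySem.List.pyGetD_map_pyRange_of_nonneg (sigB ∘ g) 30 b none (by omega) hb] at this
      simp only [Bool.and_eq_true, beq_iff_eq, bne_iff_ne, not_and, ne_eq, not_not] at this
      exact this hmod
    rcases lt_trichotomy i j with hij | rfl | hij
    · exact key i j hi.1 hi.2 hij hj.2 hm
    · rfl
    · exact (key j i hj.1 hj.2 hij hi.2 hm.symm).symm
  · intro h i hi
    rw [PySem.List.mem_pyRange_one] at hi
    simp only [List.any_eq_true, not_exists, not_and]
    intro j hj
    rw [PySem.List.mem_pyRange_one] at hj
    rw [PySem.List.pyGetD_map_pyRange_of_nonneg g 30 i 0 hi.1 hi.2,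
        PySem.List.pyGetD_map_pyRange_of_nonneg g 30 j 0 (by omega) hj.2,
        PySem.List.pyGetD_map_pyRange_of_nonneg (sigB ∘ g) 30 i none hi.1 hi.2,
        PySem.List.pyGetD_map_pyRange_of_nonneg (sigB ∘ g) 30 j none (by omega) hj.2]
    simp only [Bool.and_eq_true, beq_iff_eq, bne_iff_ne, ne_eq, not_and, not_not]
    intro hmod
    exact h (g i) (List.mem_map.mpr ⟨i, PySem.List.mem_pyRange_one.mpr ⟨hi.1, hi.2⟩, rfl⟩)
      (g j) (List.mem_map.mpr ⟨j, PySem.List.mem_pyRange_one.mpr ⟨by omega, hj.2⟩, rfl⟩) hmod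

-- per-exponent: A's bucket check and B's pair scan agree, hence the loops agree
lemma loops_eq (base : Int) : ∀ exps : List Int,
    fmmA_loop ((PySem.List.pyRange 0 30 1).map (fun i => base + 128 * i)) exps
      = fmmB_loop ((PySem.List.pyRange 0 30 1).map (fun i => base + 128 * i))
          (((PySem.List.pyRange 0 30 1).map (fun i => base + 128 * i)).map sigB) exps
  | [] => rfl
  | exp :: rest => by
    rw [fmmA_loop, fmmB_loop]
    simp only []
    have hstep : (fun (d : PySem.Dict Int (PySem.Set (Option (Int × Int × Int)))) (n : Int) =>
        PySem.Dict.modify (if d.contains (PySem.Int.mod n ((2:Int) ^ exp.toNat)) then d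
            else d.insert (PySem.Int.mod n ((2:Int) ^ exp.toNat)) PySem.Set.empty)
          (PySem.Int.mod n ((2:Int) ^ exp.toNat)) PySem.Set.empty
          (fun s => PySem.Set.add s (get_arithmetic_signature n)))
        = (fun d n => PySem.Dict.modify d (PySem.Int.mod n ((2:Int) ^ exp.toNat)) PySem.Set.empty
            (fun s => PySem.Set.add s (get_arithmetic_signature n))) := by
      funext d n; exact step_modify d _ _ _
    rw [hstep, hf_eq]
    have hA := consA_set_iff' (fun n => PySem.Int.mod n ((2:Int) ^ exp.toNat))
      get_arithmetic_signature ((PySem.List.pyRange 0 30 1).map (fun i => base + 128 * i))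
    rw [hf_eq] at hA
    have hB := bad_iff (fun i => base + 128 * i) ((2:Int) ^ exp.toNat)
    rcases hbad : ((PySem.List.pyRange 0 30 1).any (fun i =>
      (PySem.List.pyRange (i + 1) 30 1).any (fun j =>
        (PySem.Int.mod (PySem.List.pyGetD ((PySem.List.pyRange 0 30 1).map (fun i => base + 128 * i)) i 0) ((2:Int) ^ exp.toNat)
            == PySem.Int.mod (PySem.List.pyGetD ((PySem.List.pyRange 0 30 1).map (fun i => base + 128 * i)) j 0) ((2:Int) ^ exp.toNat))
        && (PySem.List.pyGetD (((PySem.List.pyRange 0 30 1).map (fun i => base + 128 * i)).map sigB) i none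
            != PySem.List.pyGetD (((PySem.List.pyRange 0 30 1).map (fun i => base + 128 * i)).map sigB) j none))))
    · -- bad = false: both return (false, modulus)
      rw [hA.mpr (hB.mp hbad)]
      simp
    · -- bad = true: both recurse
      rw [hbad] at hB
      have hcond : ((List.foldl (fun d n => d.modify (PySem.Int.mod n ((2:Int) ^ exp.toNat)) PySem.Set.empty fun s => s.add (sigB n))
          PySem.Dict.empty (List.map (fun i => base + 128 * i) (PySem.List.pyRange 0 30))).values.all
            fun sigs => sigs.len == 1) = false := by
        rcases hc : ((List.foldl (fun d n => d.modify (PySem.Int.mod n ((2:Int) ^ exp.toNat)) PySem.Set.empty fun s => s.add (sigB n))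
            PySem.Dict.empty (List.map (fun i => base + 128 * i) (PySem.List.pyRange 0 30))).values.all
              fun sigs => sigs.len == 1)
        · rfl
        · exact absurd (hB.mpr (hA.mp hc)) (by simp)
      rw [hcond]
      simp only [Bool.false_eq_true, if_false, if_true]
      exact loops_eq base rest

-- B's "all signatures equal sigs[0]" check, as a statement about the list
lemma all64_iff (g : Int → Int) :
    ((((PySem.List.pyRange 0 30 1).map g).map sigB).all
        (fun s => s == PySem.List.pyGetD (((PySem.List.pyRange 0 30 1).map g).map sigB) 0 none) = true)
      ↔ ∀ x ∈ (PySem.List.pyRange 0 30 1).map g, sigB x = sigB (g 0) := by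
  rw [List.map_map,
      PySem.List.pyGetD_map_pyRange_of_nonneg (sigB ∘ g) 30 0 none (le_refl 0) (by norm_num)]
  simp only [List.all_eq_true, List.mem_map, beq_iff_eq]
  constructor
  · rintro h x ⟨i, hi, rfl⟩
    exact h _ ⟨i, hi, rfl⟩
  · rintro h s ⟨i, hi, rfl⟩
    exact h (g i) ⟨i, hi, rfl⟩

theorem find_min_modulus_spec : Claim_equal_find_min_modulus := by
  intro residue branch max_modulus _hdom
  show find_min_modulus residue branch max_modulus = find_min_modulus_alt residue branch max_modulus
  rw [find_min_modulus, find_min_modulus_alt, find_representatives]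
  have hg : (fun i : Int => 64 * (2 * 0 + branch) + residue + 128 * i)
      = (fun i : Int => 64 * branch + residue + 128 * i) := by funext i; ring
  rw [hg]
  have hstep : (fun (d : PySem.Dict Int (List (Option (Int × Int × Int)))) (n : Int) =>
      PySem.Dict.modify (if d.contains (PySem.Int.mod n 64) then d
          else d.insert (PySem.Int.mod n 64) ([] : List (Option (Int × Int × Int))))
        (PySem.Int.mod n 64) [] (fun sigs => sigs ++ [get_arithmetic_signature n]))
      = (fun d n => PySem.Dict.modify d (PySem.Int.mod n 64) []
          (fun sigs => sigs ++ [get_arithmetic_signature n])) := by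
    funext d n; exact step_modify d _ _ _
  rw [hstep, hf_eq]
  have hA := consA_list_iff' (fun n => PySem.Int.mod n 64) sigB
    ((PySem.List.pyRange 0 30 1).map (fun i => 64 * branch + residue + 128 * i))
  have hB := all64_iff (fun i => 64 * branch + residue + 128 * i)
  have hmem0 : (64 * branch + residue + 128 * 0)
      ∈ (PySem.List.pyRange 0 30 1).map (fun i => 64 * branch + residue + 128 * i) :=
    List.mem_map.mpr ⟨0, PySem.List.mem_pyRange_one.mpr ⟨le_refl 0, by norm_num⟩, rfl⟩
  have hkey : ∀ x ∈ (PySem.List.pyRange 0 30 1).map (fun i => 64 * branch + residue + 128 * i),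
      PySem.Int.mod x 64 = PySem.Int.mod (64 * branch + residue) 64 := by
    intro x hx
    obtain ⟨i, hi, rfl⟩ := List.mem_map.mp hx
    exact key64_const (64 * branch + residue) i
  have hiff : (∀ x ∈ (PySem.List.pyRange 0 30 1).map (fun i => 64 * branch + residue + 128 * i),
        ∀ y ∈ (PySem.List.pyRange 0 30 1).map (fun i => 64 * branch + residue + 128 * i),
          PySem.Int.mod x 64 = PySem.Int.mod y 64 → sigB x = sigB y)
      ↔ (∀ x ∈ (PySem.List.pyRange 0 30 1).map (fun i => 64 * branch + residue + 128 * i),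
          sigB x = sigB (64 * branch + residue + 128 * 0)) := by
    constructor
    · intro h x hx
      exact h x hx _ hmem0 ((hkey x hx).trans (hkey _ hmem0).symm)
    · intro h x hx y hy _
      exact (h x hx).trans (h y hy).symm
  rcases hb : (((PySem.List.pyRange 0 30 1).map (fun i => 64 * branch + residue + 128 * i)).map sigB).all
      (fun s => s == PySem.List.pyGetD ((((PySem.List.pyRange 0 30 1)).map
        (fun i => 64 * branch + residue + 128 * i)).map sigB) 0 none)
  · -- B says not all equal: A's check is false too, both go to the loops
    have hcond : (((PySem.List.pyRange 0 30 1).map (fun i => 64 * branch + residue + 128 * i)).foldl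
        (fun d n => PySem.Dict.modify d (PySem.Int.mod n 64) []
          (fun sigs => sigs ++ [sigB n])) PySem.Dict.empty).values.all
        (fun sigs => sigs.length == 0 || PySem.Set.len (PySem.Set.ofList sigs) == 1) = false := by
      rcases hc : (((PySem.List.pyRange 0 30 1).map (fun i => 64 * branch + residue + 128 * i)).foldl
          (fun d n => PySem.Dict.modify d (PySem.Int.mod n 64) []
            (fun sigs => sigs ++ [sigB n])) PySem.Dict.empty).values.all
          (fun sigs => sigs.length == 0 || PySem.Set.len (PySem.Set.ofList sigs) == 1)
      · rfl
      · have htrue := hB.mpr (hiff.mp (hA.mp hc))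
        rw [htrue] at hb
        exact Bool.noConfusion hb
    rw [hcond]
    simp only [Bool.false_eq_true, if_false]
    exact loops_eq (64 * branch + residue) (PySem.List.pyRange 7 21 1)
  · -- B says all equal: A's check is true too, both return (true, 64)
    rw [hA.mpr (hiff.mpr (hB.mp hb))]
    simp
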